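-- pv_equiv track=rewrite | github.com/deborabayril/BirdSort2 | search.py | obter_dados_do_estado_inicial
-- ===== SOURCE A (Python) =====
-- def obter_dados_do_estado_inicial(estado_inicial):
--     """
--     Determina o número de cores e o número de pássaros por cor no estado inicial.
--     """
--     contador_cores = {}  # Dicionário para contar o número de pássaros por cor
--
--     for galho in estado_inicial:
--         for passaro in galho:
--             if passaro not in contador_cores:
--                 contador_cores[passaro] = 0
--             contador_cores[passaro] += 1
--
--     num_cores = len(contador_cores)  # Número de cores distintas
--     passaros_por_cor = list(contador_cores.values())[0] if contador_cores else 0  # Número de pássaros por cor (assume que todas as cores têm o mesmo número de pássaros)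
--
--     return num_cores, passaros_por_cor
-- ===== SOURCE B (Python) =====
-- def obter_dados_do_estado_inicial(estado_inicial):
--     todos = [passaro for galho in estado_inicial for passaro in galho]
--     if not todos:
--         return 0, 0
--     fl = sorted(todos)
--     num_cores = 1
--     anterior = fl[0]
--     for passaro in fl[1:]:
--         if passaro != anterior:
--             num_cores += 1
--         anterior = passaro
--     return num_cores, fl.count(todos[0])
-- ===== Notes on version B (the rewrite author's own statement) =====
-- stated objective: alternative
-- what changed: Replaces A's one-pass counting dict with sort-then-scan: the flattened birds are sorted, the distinct-color count is found by counting adjacent boundaries in the sorted list, and the first bird's multiplicity is counted in the sorted list.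
import Mathlib
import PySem

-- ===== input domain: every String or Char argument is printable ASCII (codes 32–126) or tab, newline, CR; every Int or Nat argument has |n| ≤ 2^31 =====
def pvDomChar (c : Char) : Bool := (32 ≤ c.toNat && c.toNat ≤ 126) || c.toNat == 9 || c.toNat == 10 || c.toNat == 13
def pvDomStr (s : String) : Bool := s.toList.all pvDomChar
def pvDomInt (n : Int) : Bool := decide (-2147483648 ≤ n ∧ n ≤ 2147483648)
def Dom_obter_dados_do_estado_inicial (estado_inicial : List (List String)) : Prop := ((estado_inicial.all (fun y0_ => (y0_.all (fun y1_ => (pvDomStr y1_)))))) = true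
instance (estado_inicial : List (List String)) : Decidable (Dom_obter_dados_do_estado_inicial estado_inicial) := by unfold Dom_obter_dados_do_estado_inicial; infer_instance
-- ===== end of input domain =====

-- B replaces A's one-pass counting dict with sort-then-scan: sort the flattened birds, count adjacent boundaries for the distinct-color count, count the first bird in the sorted list (objective: alternative).


-- ===== PORT A =====
def obter_dados_do_estado_inicial (estado_inicial : List (List String)) : Int × Int :=
  let contador_cores : PySem.Dict String Int :=
    estado_inicial.foldl (fun d galho =>
      galho.foldl (fun d passaro =>
        -- if passaro not in contador_cores: contador_cores[passaro] = 0
        let d := if d.contains passaro then d else d.insert passaro 0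
        -- contador_cores[passaro] += 1
        d.insert passaro (d.getD passaro 0 + 1)) d) PySem.Dict.empty
  let num_cores : Int := contador_cores.size
  let passaros_por_cor : Int :=
    if contador_cores.items.isEmpty then 0 else contador_cores.values.headD 0
  (num_cores, passaros_por_cor)

-- ===== PORT B =====
def obter_dados_do_estado_inicial_alt (estado_inicial : List (List String)) : Int × Int :=
  let todos : List String := estado_inicial.flatMap (fun galho => galho)
  match todos with
  | [] => (0, 0)
  | t :: _ =>
    let fl := PySem.List.sorted todos (fun x => x) false
    match fl with
    | [] => (0, 0)  -- unreachable: sorted of a nonempty list is nonempty (totality guard only)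
    | f :: rest =>
      let s := rest.foldl (fun (s : Int × String) passaro =>
        (if passaro ≠ s.2 then s.1 + 1 else s.1, passaro)) (1, f)
      (s.1, fl.count t)

-- ===== PRECONDITION & SPEC =====
def Spec_obter_dados_do_estado_inicial (estado_inicial : List (List String)) (out : Int × Int) : Prop := out = obter_dados_do_estado_inicial_alt estado_inicial
instance (estado_inicial : List (List String)) (out : Int × Int) : Decidable (Spec_obter_dados_do_estado_inicial estado_inicial out) := by unfold Spec_obter_dados_do_estado_inicial; infer_instance

-- ===== CLAIM (what is proved, stated in full; the proofs are below) =====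
def Claim_equal_obter_dados_do_estado_inicial : Prop := ∀ (estado_inicial : List (List String)), Dom_obter_dados_do_estado_inicial estado_inicial → Spec_obter_dados_do_estado_inicial estado_inicial (obter_dados_do_estado_inicial estado_inicial)

-- ===== LEMMAS AND PROOFS =====

-- A's loop body (setdefault-to-0 then += 1) is one overwrite-insert of count+1.
theorem step_eq (d : PySem.Dict String Int) (p : String) :
    (let d' := if d.contains p then d else d.insert p 0
     d'.insert p (d'.getD p 0 + 1)) = d.insert p (d.getD p 0 + 1) := by
  by_cases h : d.contains p = true
  · simp [h]
  · simp only [if_neg h]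
    rw [PySem.Dict.getD_insert_self, PySem.Dict.insert_insert_self,
        PySem.Dict.getD_of_not_contains d 0 (by simpa using h)]

-- The nested loop over branches equals the same fold over the flattened bird list.
theorem nested_foldl {α : Type} (f : PySem.Dict String Int → α → PySem.Dict String Int)
    (l : List (List α)) (d : PySem.Dict String Int) :
    l.foldl (fun d g => g.foldl f d) d = (l.flatMap (fun g => g)).foldl f d := by
  induction l generalizing d with
  | nil => rfl
  | cons g rest ih => simp [List.flatMap_cons, List.foldl_append, ih]

-- A computes (number of distinct birds, count of the first bird) of the flattened list.
theorem a_characterisation (e : List (List String)) :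
    obter_dados_do_estado_inicial e =
      (((PySem.Set.ofList (e.flatMap (fun g => g))).length : Int),
       match e.flatMap (fun g => g) with
       | [] => 0
       | t :: _ => ((e.flatMap (fun g => g)).count t : Int)) := by
  unfold obter_dados_do_estado_inicial
  have hstep : (fun (d : PySem.Dict String Int) (p : String) =>
      let d' := if d.contains p then d else d.insert p 0
      d'.insert p (d'.getD p 0 + 1)) = fun d p => d.insert p (d.getD p 0 + 1) := by
    funext d p; exact step_eq d p
  simp only [hstep, nested_foldl, PySem.Dict.foldl_insert_getD_add_one_eq_counter]
  set todos := e.flatMap (fun g => g) with htodos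
  have hitems := PySem.Dict.items_counter (xs := todos)
  refine congrArg₂ Prod.mk ?_ ?_
  · show ((PySem.Dict.counter todos).size : Int) = _
    simp [PySem.Dict.size, hitems]
  · cases todos with
    | nil => simp [PySem.Dict.counter, PySem.Dict.empty]
    | cons t rest =>
      have : (PySem.Dict.counter (t :: rest)).items
          = (PySem.Set.ofList (t :: rest)).map (fun k => (k, ((t :: rest).count k : Int))) :=
        PySem.Dict.items_counter (t :: rest)
      rw [PySem.Set.ofList_cons] at this
      simp [PySem.Dict.values, this]

-- On a sorted list f :: rest, the boundary-counting fold computes c - 1 + #distinct.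
theorem fold_count (rest : List String) (f : String) (c : Int)
    (h : (f :: rest).Pairwise (· ≤ ·)) :
    (rest.foldl (fun (s : Int × String) passaro =>
        (if passaro ≠ s.2 then s.1 + 1 else s.1, passaro)) (c, f)).1
      = c - 1 + ((f :: rest).toFinset.card : Int) := by
  induction rest generalizing f c with
  | nil => simp
  | cons y ys ih =>
    have hy : f ≤ y := (List.pairwise_cons.mp h).1 y (List.mem_cons_self ..)
    have htail : (y :: ys).Pairwise (· ≤ ·) := (List.pairwise_cons.mp h).2
    simp only [List.foldl_cons]
    by_cases hfy : y = f
    · subst hfy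
      simp only [ne_eq, not_true_eq_false, if_false]
      rw [ih y c htail]
      simp
    · have hne : (y ≠ f) = True := by simp [hfy]
      simp only [ne_eq, hfy, not_false_eq_true, if_pos]
      rw [ih y (c + 1) htail]
      have hnotmem : f ∉ y :: ys := by
        intro hmem
        rcases List.mem_cons.mp hmem with h1 | h1
        · exact hfy h1.symm
        · have : y ≤ f := (List.pairwise_cons.mp htail).1 f h1
          exact hfy (le_antisymm this hy)
      have : (f :: y :: ys).toFinset = insert f (y :: ys).toFinset := by simp
      rw [this, Finset.card_insert_of_notMem (by simpa using hnotmem)]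
      push_cast
      ring

theorem ofList_length_eq_card (l : List String) :
    (PySem.Set.ofList l).length = l.toFinset.card := by
  have hnd : (PySem.Set.ofList l).Nodup := PySem.Set.nodup_ofList l
  have hmem : ∀ x, x ∈ PySem.Set.ofList l ↔ x ∈ l := fun x => PySem.Set.mem_ofList l x
  have : (PySem.Set.ofList l).toFinset = l.toFinset := by
    ext x; simp [hmem x]
  rw [← List.toFinset_card_of_nodup hnd, this]

-- ===== VERDICT (by name: the statement is the Claim_ definition above) =====
theorem obter_dados_do_estado_inicial_spec : Claim_equal_obter_dados_do_estado_inicial := by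
  intro e _
  unfold Spec_obter_dados_do_estado_inicial
  rw [a_characterisation]
  unfold obter_dados_do_estado_inicial_alt
  set todos := e.flatMap (fun g => g) with htodos
  cases htd : todos with
  | nil => simp [PySem.Set.ofList]
  | cons t rest =>
    simp only
    have hperm : (PySem.List.sorted (t :: rest) (fun x => x) false).Perm (t :: rest) :=
      PySem.List.sorted_perm ..
    have hsne : PySem.List.sorted (t :: rest) (fun x => x) false ≠ [] := by
      intro hnil
      have := (PySem.List.sorted_eq_nil_iff (xs := t :: rest) (key := fun x => x) (rev := false)).mp hnil
      simp at this
    cases hfl : PySem.List.sorted (t :: rest) (fun x => x) false with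
    | nil => exact absurd hfl hsne
    | cons f fs =>
      have hpw : (f :: fs).Pairwise (· ≤ ·) := by
        have := PySem.List.sorted_pairwise (xs := t :: rest) (key := fun x => x)
        rw [hfl] at this
        exact this
      refine congrArg₂ Prod.mk ?_ ?_
      · rw [fold_count fs f 1 hpw]
        have hfin : (f :: fs).toFinset = (t :: rest).toFinset := by
          have := hperm; rw [hfl] at this
          exact List.toFinset_eq_of_perm _ _ this
        rw [hfin, ofList_length_eq_card]
        ring
      · have := hperm; rw [hfl] at this
        exact_mod_cast (this.count_eq t).symm
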